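-- pv_equiv track=rewrite | github.com/AsokTamang/Leetcode-DSA | basics/bsd.py | brutedivisor
-- ===== SOURCE A (Python) =====
-- import math
--
-- def brutedivisor(array,l):    #here l is the limit threshold as the sum of the value obtained after dividing the numbers in an array by that specific number must be less than or equal to this
--     for i in range(1,max(array)+1):
--         s= 0
--         for num in array:
--             s+=math.ceil(num/i)
--         if s<=l:
--             return i
--     return -1
-- ===== SOURCE B (Python) =====
-- def brutedivisor(array, l):
--     # Divisor-block jumping: num//i takes O(sqrt(num)) distinct values, so after a
--     # failing candidate i jump straight past the block of divisors on which every
--     # quotient (hence the whole sum) is provably unchanged.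
--     M = max(array)
--     pos = [num - 1 for num in array if num > 0]   # ceil(num/i) == m//i + 1 for m = num-1
--     neg = [-num for num in array if num <= 0]     # ceil(num/i) == -(m//i)  for m = -num
--     base = len(pos)
--     i = 1
--     while i <= M:
--         s = base + sum(m // i for m in pos) - sum(m // i for m in neg)
--         if s <= l:
--             return i
--         # last divisor of the current block: min over block ends m//(m//i)
--         cand = min((m // (m // i) for m in pos if m >= i), default=M)
--         cand = min(cand, min((m // (m // i) for m in neg if m >= i), default=M))
--         i = max(i + 1, cand + 1)
--     return -1
-- ===== Notes on version B (the rewrite author's own statement) =====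
-- stated objective: alternative
-- what changed: A re-evaluates the ceiling-sum at every candidate divisor i = 1..max(array); B rewrites each term as a floor quotient of a non-negative value and, after a failing candidate, jumps straight past the whole divisor block [i, m//(m//i)] on which every quotient (hence the sum) is provably unchanged, so whole runs of candidates are skipped.
import Mathlib
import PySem

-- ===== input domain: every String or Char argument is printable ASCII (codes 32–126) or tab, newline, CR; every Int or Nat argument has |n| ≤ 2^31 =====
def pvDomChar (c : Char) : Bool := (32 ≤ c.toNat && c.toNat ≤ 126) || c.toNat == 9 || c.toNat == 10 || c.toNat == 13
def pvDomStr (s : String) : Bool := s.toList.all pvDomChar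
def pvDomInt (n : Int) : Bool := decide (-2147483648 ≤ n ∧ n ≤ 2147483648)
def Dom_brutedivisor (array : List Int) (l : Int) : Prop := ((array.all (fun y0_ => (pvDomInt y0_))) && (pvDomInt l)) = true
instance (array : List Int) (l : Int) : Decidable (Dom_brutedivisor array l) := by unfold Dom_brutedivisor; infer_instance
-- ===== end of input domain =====

-- B replaces A's one-by-one scan of candidate divisors by divisor-block jumping
-- (skip whole runs of i on which every quotient num//i — hence the sum — is unchanged).

-- ===== PORT A =====
-- math.ceil(num/i): exact integer ceiling division; on Dom (|num| ≤ 2^31 < 2^53, i ≥ 1)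
-- Python's float division followed by math.ceil returns exactly this value.
def pyCeil (num i : Int) : Int := -(PySem.Int.floordiv (-num) i)

-- the inner 'for num in array: s += math.ceil(num/i)' loop
def bruteSum (array : List Int) (i : Int) : Int :=
  array.foldl (fun s num => s + pyCeil num i) 0

-- the outer 'for i in range(1, max(array)+1)' loop with its early return
-- (iterated lazily, i = 1, 2, …, like Python's range iterator, instead of
-- materializing the list, which can hold 2^31 elements on Dom)
def bruteGo (array : List Int) (l M i : Int) : Int :=
  if i < M + 1 then
    if bruteSum array i ≤ l then i else bruteGo array l M (i + 1)
  else -1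
termination_by (M + 1 - i).toNat

def brutedivisor (array : List Int) (l : Int) : Int :=
  match PySem.List.max? array (fun x => x) with
  | none => -1  -- Python raises ValueError on max([]) : excluded by Pre_
  | some m => bruteGo array l m 1

-- ===== PORT B =====
-- [num - 1 for num in array if num > 0]
def posOf (array : List Int) : List Int :=
  (array.filter (fun num => decide (0 < num))).map (fun num => num - 1)

-- [-num for num in array if num <= 0]
def negOf (array : List Int) : List Int :=
  (array.filter (fun num => decide (num ≤ 0))).map (fun num => -num)

-- Python's min(xs, default=d)
def pyMinD (xs : List Int) (d : Int) : Int :=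
  match xs with
  | [] => d
  | x :: t => t.foldl min x

-- 'min((m // (m // i) for m in ms if m >= i), default=d)'
def candOf (ms : List Int) (i d : Int) : Int :=
  pyMinD ((ms.filter (fun m => decide (i ≤ m))).map
    (fun m => PySem.Int.floordiv m (PySem.Int.floordiv m i))) d

-- the 'while i <= M' loop of Source B
def altGo (pos neg : List Int) (base l M i : Int) : Int :=
  if i ≤ M then
    let s := base + pos.foldl (fun a m => a + PySem.Int.floordiv m i) 0
               - neg.foldl (fun a m => a + PySem.Int.floordiv m i) 0
    if s ≤ l then i
    else altGo pos neg base l M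
      (max (i + 1) (min (candOf pos i M) (candOf neg i M) + 1))
  else -1
termination_by (M + 1 - i).toNat
decreasing_by
  have h1 := le_max_left (i + 1) (min (candOf pos i M) (candOf neg i M) + 1)
  omega

def brutedivisor_alt (array : List Int) (l : Int) : Int :=
  match PySem.List.max? array (fun x => x) with
  | none => -1  -- unreachable under Pre_ (Python's max([]) raises)
  | some m => altGo (posOf array) (negOf array) ((posOf array).length : Int) l m 1

-- ===== PRECONDITION & SPEC =====
-- Python's max(array) raises ValueError on the empty list; that is the only exception A can raise.
def Pre_brutedivisor (array : List Int) (l : Int) : Prop := array ≠ []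
instance (array : List Int) (l : Int) : Decidable (Pre_brutedivisor array l) := by
  unfold Pre_brutedivisor; infer_instance

def pvWitness_brutedivisor : List Int × Int := ([3, 1, 4], 4)

def Spec_brutedivisor (array : List Int) (l : Int) (out : Int) : Prop := out = brutedivisor_alt array l
instance (array : List Int) (l : Int) (out : Int) : Decidable (Spec_brutedivisor array l out) := by unfold Spec_brutedivisor; infer_instance

-- ===== CLAIM (what is proved, stated in full; the proofs are below) =====
def Claim_equal_brutedivisor : Prop := ∀ (array : List Int) (l : Int), Dom_brutedivisor array l → Pre_brutedivisor array l → Spec_brutedivisor array l (brutedivisor array l)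

-- ===== LEMMAS AND PROOFS =====

-- ceiling by floor: for num ≥ 1, i ≥ 1, ceil(num/i) = (num-1)//i + 1
lemma pyCeil_pos {num i : Int} (hi : 0 < i) (_hnum : 0 < num) :
    pyCeil num i = PySem.Int.floordiv (num - 1) i + 1 := by
  unfold pyCeil
  rw [PySem.Int.neg_floordiv_neg_eq_iff_of_pos hi]
  have h2 : PySem.Int.floordiv (num - 1) i * i ≤ num - 1 ∧
      num - 1 < (PySem.Int.floordiv (num - 1) i + 1) * i :=
    (PySem.Int.floordiv_eq_iff_of_pos hi).mp rfl
  constructor <;> nlinarith [h2.1, h2.2]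

-- sum over the array splits into the positive and non-positive parts (sum_split)
lemma sum_split (i : Int) (hi : 0 < i) (array : List Int) :
    bruteSum array i =
      ((posOf array).length : Int)
        + (posOf array).foldl (fun a m => a + PySem.Int.floordiv m i) 0
        - (negOf array).foldl (fun a m => a + PySem.Int.floordiv m i) 0 := by
  unfold bruteSum
  rw [PySem.List.foldl_add, PySem.List.foldl_add, PySem.List.foldl_add]
  simp only [zero_add]
  induction array with
  | nil => simp [posOf, negOf]
  | cons num t ih =>
      by_cases h : 0 < num
      · simp only [posOf, negOf, List.filter_cons, decide_eq_true_eq, if_pos h,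
          if_neg (by omega : ¬ num ≤ 0), List.map_cons, List.length_cons, List.sum_cons,
          List.map_map] at *
        rw [pyCeil_pos hi h]
        push_cast
        omega
      · simp only [posOf, negOf, List.filter_cons, decide_eq_true_eq, if_neg h,
          if_pos (by omega : num ≤ 0), List.map_cons, List.sum_cons, List.map_map] at *
        show pyCeil num i + _ = _
        rw [show pyCeil num i = -(PySem.Int.floordiv (-num) i) from rfl]
        omega

lemma posOf_nonneg {array : List Int} {m : Int} (h : m ∈ posOf array) : 0 ≤ m := by
  unfold posOf at h
  simp only [List.mem_map, List.mem_filter, decide_eq_true_eq] at h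
  obtain ⟨num, ⟨_, hpos⟩, rfl⟩ := h; omega

lemma negOf_nonneg {array : List Int} {m : Int} (h : m ∈ negOf array) : 0 ≤ m := by
  unfold negOf at h
  simp only [List.mem_map, List.mem_filter, decide_eq_true_eq] at h
  obtain ⟨num, ⟨_, hle⟩, rfl⟩ := h; omega

-- quotient is constant on a divisor block
lemma floordiv_block {m i j : Int} (hm : 0 ≤ m) (hi : 0 < i) (hij : i ≤ j)
    (hj : 0 < PySem.Int.floordiv m i → j ≤ PySem.Int.floordiv m (PySem.Int.floordiv m i)) :
    PySem.Int.floordiv m j = PySem.Int.floordiv m i := by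
  have hjpos : 0 < j := lt_of_lt_of_le hi hij
  set q := PySem.Int.floordiv m i with hq
  have hbr : q * i ≤ m ∧ m < (q + 1) * i := (PySem.Int.floordiv_eq_iff_of_pos hi).mp rfl
  have hq0 : 0 ≤ q := by
    rw [hq]
    exact (PySem.Int.le_floordiv_iff_mul_le hi).mpr (by simpa using hm)
  rcases lt_or_eq_of_le hq0 with hqpos | hqz
  · have hcand := hj hqpos
    have h1 : q ≤ PySem.Int.floordiv m j := by
      rw [PySem.Int.le_floordiv_iff_mul_le hjpos]
      have := (PySem.Int.le_floordiv_iff_mul_le (a := m) (q := j) hqpos).mp hcand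
      linarith [this]
    have h2 : PySem.Int.floordiv m j < q + 1 := by
      rw [PySem.Int.floordiv_lt_iff_lt_mul hjpos]
      nlinarith [hbr.2]
    omega
  · rw [PySem.Int.floordiv_eq_iff_of_pos hjpos]
    constructor <;> nlinarith [hbr.2]

lemma pyMinD_le_mem {xs : List Int} {x : Int} (hx : x ∈ xs) (d : Int) :
    pyMinD xs d ≤ x := by
  match xs, hx with
  | y :: t, hx =>
      have h := PySem.List.foldl_min_le t y
      rcases List.mem_cons.mp hx with rfl | hxt
      · exact h.1
      · exact h.2 x hxt

lemma candOf_le {ms : List Int} {m : Int} (hm : m ∈ ms) {i : Int} (him : i ≤ m) (d : Int) :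
    candOf ms i d ≤ PySem.Int.floordiv m (PySem.Int.floordiv m i) := by
  unfold candOf
  exact pyMinD_le_mem (List.mem_map_of_mem
    (List.mem_filter.mpr ⟨hm, by simpa using him⟩)) d

-- within the current block the whole sum is unchanged
lemma bruteSum_block {array : List Int} {i j M : Int} (hi : 0 < i) (hij : i ≤ j)
    (hjn : j < min (candOf (posOf array) i M) (candOf (negOf array) i M) + 1) :
    bruteSum array j = bruteSum array i := by
  have hj : 0 < j := lt_of_lt_of_le hi hij
  have key : ∀ (ms : List Int), (∀ x ∈ ms, 0 ≤ x) →
      j ≤ candOf ms i M →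
      ms.foldl (fun a m => a + PySem.Int.floordiv m j) 0 =
        ms.foldl (fun a m => a + PySem.Int.floordiv m i) 0 := by
    intro ms hnn hcand
    refine PySem.List.foldl_congr_mem' _ _ _ _ (fun m hm acc => ?_)
    rw [floordiv_block (hnn m hm) hi hij]
    intro hq
    have him : i ≤ m := by
      have := (PySem.Int.le_floordiv_iff_mul_le (a := m) (q := 1) hi).mp (by omega)
      omega
    have h2 := candOf_le hm him M
    omega
  rw [sum_split i hi, sum_split j hj,
    key _ (fun x hx => posOf_nonneg hx) (by omega),
    key _ (fun x hx => negOf_nonneg hx) (by omega)]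

-- A's scan skips a stretch of failing candidates
lemma skipA (array : List Int) (l M : Int) :
    ∀ (n : Nat) (i k : Int), (k - i).toNat ≤ n → i ≤ k →
      (∀ j, i ≤ j → j < k → ¬ bruteSum array j ≤ l) →
      bruteGo array l M i = bruteGo array l M k := by
  intro n
  induction n with
  | zero =>
      intro i k hn hik _
      have : i = k := by omega
      rw [this]
  | succ n ih =>
      intro i k hn hik hfail
      rcases eq_or_lt_of_le hik with rfl | hlt
      · rfl
      by_cases hiM : i < M + 1
      · rw [bruteGo, if_pos hiM, if_neg (hfail i le_rfl hlt)]
        exact ih (i + 1) k (by omega) (by omega) (fun j h1 h2 => hfail j (by omega) h2)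
      · rw [bruteGo, if_neg hiM, bruteGo, if_neg (by omega : ¬ k < M + 1)]

-- the main induction: block jumping agrees with the one-by-one scan
lemma main_ind (array : List Int) (l M : Int) :
    ∀ (n : Nat) (i : Int), (M + 1 - i).toNat ≤ n → 0 < i →
      altGo (posOf array) (negOf array) ((posOf array).length : Int) l M i =
        bruteGo array l M i := by
  intro n
  induction n with
  | zero =>
      intro i hn hi
      rw [altGo, if_neg (by omega : ¬ i ≤ M), bruteGo, if_neg (by omega : ¬ i < M + 1)]
  | succ n ih =>
      intro i hn hi
      by_cases hiM : i ≤ M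
      · rw [altGo, if_pos hiM, bruteGo, if_pos (by omega : i < M + 1)]
        rw [← sum_split i hi]
        by_cases hs : bruteSum array i ≤ l
        · simp only [if_pos hs]
        · simp only [if_neg hs]
          set nxt := min (candOf (posOf array) i M) (candOf (negOf array) i M) + 1
            with hnxt
          have hrec := ih (max (i + 1) nxt) (by omega) (by omega)
          rw [hrec]
          refine (skipA array l M ((max (i + 1) nxt - (i + 1)).toNat) (i + 1)
            (max (i + 1) nxt) le_rfl (le_max_left _ _) (fun j h1 h2 => ?_)).symm
          have hjn : j < nxt := by omega
          rw [bruteSum_block hi (by omega) (hnxt ▸ hjn)]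
          exact hs
      · rw [altGo, if_neg hiM, bruteGo, if_neg (by omega : ¬ i < M + 1)]

-- ===== VERDICT (by name: the statement is the Claim_ definition above) =====
theorem brutedivisor_spec : Claim_equal_brutedivisor := by
  intro array l _hdom _hpre
  unfold Spec_brutedivisor brutedivisor brutedivisor_alt
  cases h : PySem.List.max? array (fun x => x) with
  | none => rfl
  | some m =>
      exact (main_ind array l m (m + 1 - 1).toNat 1 (by omega) (by omega)).symm
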